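-- pv_equiv track=rewrite | github.com/iscreampy/Session5-DineshK | game_rules.py | single_deck
-- ===== SOURCE A (Python) =====
-- def single_deck(card_set1, card_set2):
--     """This function checks if given card sets come from the same deck
--
--     Args:
--         card_set1 (list or tuple): input sets should be list or tuple
--         card_set2 (list or tuple): input sets should be list or tuple
--
--     Returns:
--         boolean: returns if card sets are from a single deck
--     """
--     deck_dict = {}
--     for elm in card_set1:
--         if elm in deck_dict:
--             deck_dict[elm] += 1
--         else:
--             deck_dict[elm] = 1
--
--     for elm in card_set2:
--         if elm in deck_dict:
--             deck_dict[elm] += 1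
--         else:
--             deck_dict[elm] = 1
--
--     return max(deck_dict.values()) == 1
-- ===== SOURCE B (Python) =====
-- def single_deck(card_set1, card_set2):
--     """Pairwise-comparison scan, no counting structure: repeatedly take the
--     first remaining card and compare it against all the cards after it; any
--     hit means a duplicate, so not a single deck."""
--     cards = list(card_set1) + list(card_set2)
--     while cards:
--         head = cards.pop(0)
--         if head in cards:
--             return False
--     return True
-- ===== Notes on version B (the rewrite author's own statement) =====
-- stated objective: alternative
-- what changed: B drops A's counter dict and max scan entirely and instead does a brute-force pairwise comparison: pop the first card and scan it against the remaining tail, list comparisons only, no hashing or counting.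
-- crash fix: On two empty inputs A raises ValueError (max() of an empty dict-values view) while B returns True. — e.g. on single_deck([], []): A raises ValueError, B returns true
import Mathlib
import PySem

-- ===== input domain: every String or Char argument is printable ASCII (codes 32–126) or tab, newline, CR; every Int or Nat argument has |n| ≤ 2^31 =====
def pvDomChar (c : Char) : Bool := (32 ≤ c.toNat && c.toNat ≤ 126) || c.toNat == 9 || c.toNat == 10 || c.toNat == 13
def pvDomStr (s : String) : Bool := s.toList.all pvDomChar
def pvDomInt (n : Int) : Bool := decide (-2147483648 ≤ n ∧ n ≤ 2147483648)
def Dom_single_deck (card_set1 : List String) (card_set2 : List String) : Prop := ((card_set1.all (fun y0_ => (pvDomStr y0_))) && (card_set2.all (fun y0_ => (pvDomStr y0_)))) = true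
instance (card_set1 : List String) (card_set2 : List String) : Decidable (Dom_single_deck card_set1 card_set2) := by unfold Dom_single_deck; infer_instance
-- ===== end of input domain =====

-- B replaces A's counting dict + max scan by a brute-force pairwise scan (pop the head, look for it in the tail); objective: alternative, return value only.

-- ===== PORT A =====
-- String equality is kernel-opaque here, so both ports key on s.toList (List Char), which is exact for Python's string equality.
-- one pass of A's counting loop body: 'if elm in deck_dict: deck_dict[elm] += 1 else: deck_dict[elm] = 1'
def pvCountStep (d : PySem.Dict (List Char) Int) (elm : List Char) : PySem.Dict (List Char) Int :=
  if d.contains elm then d.insert elm (d.getD elm 0 + 1) else d.insert elm 1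

def single_deck (card_set1 : List String) (card_set2 : List String) : Bool :=
  let d1 := (card_set1.map String.toList).foldl pvCountStep PySem.Dict.empty
  let d2 := (card_set2.map String.toList).foldl pvCountStep d1
  match PySem.List.max? d2.values (fun v => v) with
  | some m => m == 1
  | none => false   -- unreachable under Pre_: Python's max raises ValueError here

-- ===== PORT B =====
-- Source B's while loop: pop the first card, return False if it occurs in the rest
def pvScan : List (List Char) → Bool
  | [] => true
  | head :: cards => if cards.contains head then false else pvScan cards

def single_deck_alt (card_set1 : List String) (card_set2 : List String) : Bool :=
  pvScan ((card_set1 ++ card_set2).map String.toList)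

-- ===== PRECONDITION & SPEC =====
-- A raises ValueError (max of an empty values view) when both inputs are empty; excluded.
def Pre_single_deck (card_set1 : List String) (card_set2 : List String) : Prop :=
  ¬(card_set1 = [] ∧ card_set2 = [])
instance (card_set1 : List String) (card_set2 : List String) : Decidable (Pre_single_deck card_set1 card_set2) := by unfold Pre_single_deck; infer_instance
def pvWitness_single_deck : List String × List String := (["As", "Kd"], ["Qh"])

-- On two empty inputs A raises ValueError while B returns True (an empty deck has no duplicates).
def Raises_single_deck (card_set1 : List String) (card_set2 : List String) : Prop :=
  card_set1 = [] ∧ card_set2 = []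
instance (card_set1 : List String) (card_set2 : List String) : Decidable (Raises_single_deck card_set1 card_set2) := by unfold Raises_single_deck; infer_instance
def pvRaiseWitness_single_deck : List String × List String := ([], [])
def pvRaiseWitnessOut_single_deck : Bool := true

def Spec_single_deck (card_set1 : List String) (card_set2 : List String) (out : Bool) : Prop := out = single_deck_alt card_set1 card_set2
instance (card_set1 : List String) (card_set2 : List String) (out : Bool) : Decidable (Spec_single_deck card_set1 card_set2 out) := by unfold Spec_single_deck; infer_instance

-- ===== CLAIM (what is proved, stated in full; the proofs are below) =====
def Claim_equal_single_deck : Prop := ∀ (card_set1 : List String) (card_set2 : List String), Dom_single_deck card_set1 card_set2 → Pre_single_deck card_set1 card_set2 → Spec_single_deck card_set1 card_set2 (single_deck card_set1 card_set2)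
def Claim_raises_single_deck : Prop := (∀ (card_set1 : List String) (card_set2 : List String), Dom_single_deck card_set1 card_set2 → Raises_single_deck card_set1 card_set2 → ¬ Pre_single_deck card_set1 card_set2) ∧ (Dom_single_deck (pvRaiseWitness_single_deck.1) (pvRaiseWitness_single_deck.2) ∧ Raises_single_deck (pvRaiseWitness_single_deck.1) (pvRaiseWitness_single_deck.2) ∧ single_deck_alt (pvRaiseWitness_single_deck.1) (pvRaiseWitness_single_deck.2) = pvRaiseWitnessOut_single_deck)

-- ===== LEMMAS AND PROOFS =====

-- B's scan decides pairwise distinctness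
theorem pvScan_eq_nodup (c : List (List Char)) : pvScan c = decide c.Nodup := by
  induction c with
  | nil => simp [pvScan]
  | cons x xs ih =>
    by_cases h : x ∈ xs
    · simp [pvScan, h]
    · simp [pvScan, h, ih]

-- A's branchy counting step is the getD-insert counting step (the missing-key branch stores 1 = 0 + 1).
theorem pvCountStep_eq : pvCountStep = (fun (d : PySem.Dict (List Char) Int) x => d.insert x (d.getD x 0 + 1)) := by
  funext d x
  unfold pvCountStep
  by_cases h : d.contains x = true
  · simp [h]
  · have hnone : d.get? x = none := by
      cases hg : d.get? x with
      | none => rfl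
      | some v =>
        exact absurd (by rw [PySem.Dict.contains_eq_isSome_get?, hg]; rfl) h
    simp [h, PySem.Dict.getD, hnone]

-- the accumulated dict is Counter(card_set1 + card_set2)
theorem pvDict_eq_counter (c1 c2 : List (List Char)) :
    c2.foldl pvCountStep (c1.foldl pvCountStep PySem.Dict.empty)
      = PySem.Dict.counter (c1 ++ c2) := by
  rw [pvCountStep_eq, ← List.foldl_append,
      PySem.Dict.foldl_insert_getD_add_one_eq_counter]

-- ===== VERDICT (by name: the statement is the Claim_ definition above) =====
theorem single_deck_spec : Claim_equal_single_deck := by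
  intro c1 c2 _hdom hpre
  unfold Spec_single_deck single_deck single_deck_alt
  dsimp only
  rw [pvDict_eq_counter, ← List.map_append, pvScan_eq_nodup]
  set c : List (List Char) := (c1 ++ c2).map String.toList with hc
  have hcne : c ≠ [] := by
    intro h
    rcases List.append_eq_nil_iff.mp (List.map_eq_nil_iff.mp h) with ⟨h1, h2⟩
    exact hpre ⟨h1, h2⟩
  have hvals : (PySem.Dict.counter c).values
      = (PySem.Set.ofList c).map (fun k => (c.count k : Int)) := by
    simp [PySem.Dict.values, PySem.Dict.items_counter, List.map_map, Function.comp]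
  rw [hvals]
  cases hm : PySem.List.max? ((PySem.Set.ofList c).map (fun k => (c.count k : Int))) (fun v => v) with
  | none =>
    exfalso
    have := (PySem.List.max?_eq_none_iff _ _).mp hm
    have hofl : PySem.Set.ofList c = [] := by
      cases hl : PySem.Set.ofList c with
      | nil => rfl
      | cons y t => rw [hl] at this; simp at this
    cases hx : c with
    | nil => exact hcne hx
    | cons y t =>
      have : y ∈ PySem.Set.ofList c := (PySem.Set.mem_ofList c y).mpr (by rw [hx]; simp)
      rw [hofl] at this; simp at this
  | some m =>
    rw [Bool.eq_iff_iff]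
    simp only [beq_iff_eq, decide_eq_true_iff]
    have hmem := PySem.List.max?_mem hm
    have hmax := PySem.List.max?_isMax hm
    constructor
    · intro hm1
      rw [List.nodup_iff_count_le_one]
      intro a
      by_cases ha : a ∈ c
      · have hamem : ((c.count a : Int)) ∈ (PySem.Set.ofList c).map (fun k => (c.count k : Int)) :=
          List.mem_map_of_mem ((PySem.Set.mem_ofList c a).mpr ha)
        have := hmax _ hamem
        rw [hm1] at this
        exact_mod_cast this
      · simp [List.count_eq_zero_of_not_mem ha]
    · intro hnd
      rcases List.mem_map.mp hmem with ⟨k, hk, hkm⟩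
      have : c.count k = 1 :=
        List.count_eq_one_of_mem hnd ((PySem.Set.mem_ofList c k).mp hk)
      rw [← hkm, this]
      rfl

@[simp] theorem single_deck_raises : Claim_raises_single_deck := by
  unfold Claim_raises_single_deck
  constructor
  · intro c1 c2 _ hr hp
    exact hp hr
  · exact ⟨by decide, ⟨rfl, rfl⟩, by decide⟩
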